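-- pv_equiv track=rewrite | github.com/RichardBrookfield/AOC | 2023/Day07.py | hand_strength
-- ===== SOURCE A (Python) =====
-- def card_strength(card: str, part: int) -> int:
--     return "AKQJT98765432".find(card) if part == 1 else "AKQT98765432J".find(card)
--
-- def hand_strength(hand: str, part: int) -> int:
--     hand_copy = hand
--
--     repeats = []
--
--     if part == 2:
--         starting_length = len(hand_copy)
--         hand_copy = hand_copy.replace("J", "")
--         jokers = starting_length - len(hand_copy)
--
--     while hand_copy:
--         starting_length = len(hand_copy)
--         hand_copy = hand_copy.replace(hand_copy[0], "")
--         repeats.append(starting_length - len(hand_copy))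
--
--     repeats = sorted(repeats, reverse=True)
--
--     if part == 2:
--         if repeats:
--             repeats[0] += jokers
--         else:
--             repeats.append(jokers)
--
--     if repeats == [5]:
--         type_rank = 1
--     elif repeats == [4, 1]:
--         type_rank = 2
--     elif repeats == [3, 2]:
--         type_rank = 3
--     elif repeats == [3, 1, 1]:
--         type_rank = 4
--     elif repeats == [2, 2, 1]:
--         type_rank = 5
--     elif repeats == [2, 1, 1, 1]:
--         type_rank = 6
--     else:
--         type_rank = 7
--
--     return str(type_rank) + "".join(
--         [str(card_strength(hand[c], part)).zfill(2) for c in range(5)]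
--     )
-- ===== SOURCE B (Python) =====
-- def card_strength(card: str, part: int) -> int:
--     return "AKQJT98765432".find(card) if part == 1 else "AKQT98765432J".find(card)
--
-- _TYPE_RANKS = {(5,): 1, (4, 1): 2, (3, 2): 3, (3, 1, 1): 4, (2, 2, 1): 5, (2, 1, 1, 1): 6}
--
-- def hand_strength(hand: str, part: int) -> int:
--     cards = hand.replace("J", "") if part == 2 else hand
--     counts = {}
--     for ch in cards:
--         counts[ch] = counts.get(ch, 0) + 1
--     repeats = sorted(counts.values(), reverse=True)
--     if part == 2:
--         if repeats:
--             repeats[0] += len(hand) - len(cards)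
--         else:
--             repeats = [len(hand)]
--     type_rank = _TYPE_RANKS.get(tuple(repeats), 7)
--     return str(type_rank) + "".join(
--         [str(card_strength(hand[c], part)).zfill(2) for c in range(5)]
--     )
-- ===== Notes on version B (the rewrite author's own statement) =====
-- stated objective: idiomatic
-- what changed: Replaces the destructive while loop that repeatedly scans-and-removes via str.replace with a single-pass dict count whose values give the repeat counts, and replaces the if/elif type-rank chain with one table lookup.
import Mathlib
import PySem

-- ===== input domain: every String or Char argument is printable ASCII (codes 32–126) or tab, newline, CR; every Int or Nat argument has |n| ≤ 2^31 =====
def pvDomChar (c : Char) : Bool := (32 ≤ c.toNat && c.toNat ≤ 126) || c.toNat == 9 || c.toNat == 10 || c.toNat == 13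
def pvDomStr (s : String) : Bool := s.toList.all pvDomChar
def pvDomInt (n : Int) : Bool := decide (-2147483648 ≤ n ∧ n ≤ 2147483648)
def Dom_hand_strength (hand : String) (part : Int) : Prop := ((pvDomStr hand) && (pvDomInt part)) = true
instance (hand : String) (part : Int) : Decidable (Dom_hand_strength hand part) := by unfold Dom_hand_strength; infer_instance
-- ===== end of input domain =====

-- B replaces A's destructive scan-and-remove while loop with a single-pass dict count
-- (values = repeat counts) and the if/elif type-rank chain with one table lookup (idiomatic;
-- same return value wherever A returns, i.e. len(hand) ≥ 5).

-- ===== PORT A =====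
-- A-side helpers: 'hand_copy.replace(hand_copy[0], "")' removes every copy of the first
-- character; this lemma (replace by a single char = filter) justifies termination of the loop.
lemma pv_go_single (c : Char) : ∀ (fuel : Nat) (l acc : List Char), l.length ≤ fuel →
    PySem.Chars.replace.go [c] [] fuel l acc = acc.reverse ++ l.filter (fun x => x != c) := by
  intro fuel
  induction fuel with
  | zero => intro l acc h
            have : l = [] := List.eq_nil_of_length_eq_zero (Nat.le_zero.mp h)
            subst this; simp [PySem.Chars.replace.go]
  | succ n ih =>
    intro l acc h
    cases l with
    | nil => simp [PySem.Chars.replace.go]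
    | cons c' t =>
      by_cases hc : c = c'
      · subst hc
        simp [PySem.Chars.replace.go, List.isPrefixOf, ih t acc (by simpa using h)]
      · simp [PySem.Chars.replace.go, List.isPrefixOf, hc, ih t (c'::acc) (by simpa using h),
          bne, Ne.symm hc]

lemma pv_replace_single (c : Char) (l : List Char) :
    PySem.Chars.replace l [c] [] = l.filter (fun x => x != c) := by
  simp [PySem.Chars.replace, pv_go_single c l.length l [] le_rfl]

lemma pv_replace_head_lt (c : Char) (t : List Char) :
    (PySem.Chars.replace (c :: t) [c] []).length < (c :: t).length := by
  rw [pv_replace_single]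
  simp [List.filter]
  exact List.length_filter_le _ _

-- A's 'while hand_copy: … replace(hand_copy[0], "") … repeats.append(Δlen)' loop
def loopA : List Char → List Int
  | [] => []
  | c :: t =>
      (((c :: t).length : Int) - ((PySem.Chars.replace (c :: t) [c] []).length : Int))
        :: loopA (PySem.Chars.replace (c :: t) [c] [])
  termination_by l => l.length
  decreasing_by exact pv_replace_head_lt c t

def card_strength (card : List Char) (part : Int) : Int :=
  if part = 1 then PySem.Chars.find "AKQJT98765432".toList card
  else PySem.Chars.find "AKQT98765432J".toList card

def hand_strength (hand : String) (part : Int) : String :=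
  let hand_copy := if part = 2 then PySem.Chars.replace hand.toList ['J'] [] else hand.toList
  let jokers : Int := (hand.toList.length : Int) - (hand_copy.length : Int)
  let repeats0 := PySem.List.sorted (loopA hand_copy) (fun x => x) true
  let repeats :=
    if part = 2 then
      match repeats0 with
      | r :: rest => (r + jokers) :: rest
      | [] => [jokers]
    else repeats0
  let type_rank : Int :=
    if repeats = [5] then 1
    else if repeats = [4, 1] then 2
    else if repeats = [3, 2] then 3
    else if repeats = [3, 1, 1] then 4
    else if repeats = [2, 2, 1] then 5
    else if repeats = [2, 1, 1, 1] then 6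
    else 7
  PySem.Int.toStr type_rank ++
    PySem.Str.join "" ((PySem.List.pyRange 0 5 1).map
      (fun c => PySem.Str.zfill (PySem.Int.toStr (card_strength [PySem.List.pyGetD hand.toList c ' '] part)) 2))

-- ===== PORT B =====
def card_strength_b (card : List Char) (part : Int) : Int :=
  if part = 1 then PySem.Chars.find "AKQJT98765432".toList card
  else PySem.Chars.find "AKQT98765432J".toList card

def pv_countsOf (cards : List Char) : PySem.Dict Char Int :=
  cards.foldl (fun d ch => d.insert ch (d.getD ch 0 + 1)) PySem.Dict.empty

def pv_type_ranks : PySem.Dict (List Int) Int :=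
  PySem.Dict.ofList [([5], 1), ([4, 1], 2), ([3, 2], 3), ([3, 1, 1], 4), ([2, 2, 1], 5), ([2, 1, 1, 1], 6)]

def hand_strength_alt (hand : String) (part : Int) : String :=
  let cards := if part = 2 then PySem.Chars.replace hand.toList ['J'] [] else hand.toList
  let counts := pv_countsOf cards
  let repeats0 := PySem.List.sorted (PySem.Dict.values counts) (fun x => x) true
  let repeats :=
    if part = 2 then
      match repeats0 with
      | r :: rest => (r + ((hand.toList.length : Int) - (cards.length : Int))) :: rest
      | [] => [(hand.toList.length : Int)]
    else repeats0
  let type_rank : Int := PySem.Dict.getD pv_type_ranks repeats 7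
  PySem.Int.toStr type_rank ++
    PySem.Str.join "" ((PySem.List.pyRange 0 5 1).map
      (fun c => PySem.Str.zfill (PySem.Int.toStr (card_strength_b [PySem.List.pyGetD hand.toList c ' '] part)) 2))

-- ===== PRECONDITION & SPEC =====
-- Python A raises IndexError on hand[c] for c in range(5) iff len(hand) < 5.
def Pre_hand_strength (hand : String) (part : Int) : Prop := 5 ≤ hand.toList.length
instance (hand : String) (part : Int) : Decidable (Pre_hand_strength hand part) := by
  unfold Pre_hand_strength; infer_instance
def pvWitness_hand_strength : String × Int := ("32T3K", 1)

def Spec_hand_strength (hand : String) (part : Int) (out : String) : Prop := out = hand_strength_alt hand part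
instance (hand : String) (part : Int) (out : String) : Decidable (Spec_hand_strength hand part out) := by unfold Spec_hand_strength; infer_instance

-- ===== CLAIM (what is proved, stated in full; the proofs are below) =====
def Claim_equal_hand_strength : Prop := ∀ (hand : String) (part : Int), Dom_hand_strength hand part → Pre_hand_strength hand part → Spec_hand_strength hand part (hand_strength hand part)

-- ===== LEMMAS AND PROOFS =====
lemma pv_foldl_add_filter (c : Char) : ∀ (t acc : List Char), c ∈ acc →
    List.foldl PySem.Set.add acc t = List.foldl PySem.Set.add acc (t.filter (fun x => x != c)) := by
  intro t
  induction t with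
  | nil => intro acc h; rfl
  | cons x t ih =>
    intro acc h
    by_cases hx : x = c
    · subst hx
      have : PySem.Set.add acc x = acc := by
        simp [PySem.Set.add, PySem.Set.contains, h]
      simp [this, ih acc h]
    · have hbx : (x != c) = true := by simp [bne, hx]
      simp [List.filter, hbx, ih (PySem.Set.add acc x) (by simp [PySem.Set.mem_add, h])]

lemma pv_foldl_add_cons (c : Char) : ∀ (s acc : List Char), (∀ x ∈ s, x ≠ c) →
    List.foldl PySem.Set.add (c :: acc) s = c :: (List.foldl PySem.Set.add acc s) := by
  intro s
  induction s with
  | nil => intro acc h; rfl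
  | cons x t ih =>
    intro acc h
    have hx : x ≠ c := h x (by simp)
    have hstep : PySem.Set.add (c :: acc) x = c :: (PySem.Set.add acc x) := by
      simp [PySem.Set.add, PySem.Set.contains, hx]
      split <;> simp
    rw [List.foldl_cons, hstep, List.foldl_cons, ih _ (fun y hy => h y (by simp [hy]))]

lemma pv_dedup_cons (c : Char) (t : List Char) :
    PySem.List.dedup (c :: t) = c :: PySem.List.dedup (t.filter (fun x => x != c)) := by
  have h1 : PySem.List.dedup (c :: t) = List.foldl PySem.Set.add [c] t := by
    simp [PySem.List.dedup_eq_ofList, PySem.Set.ofList_eq_foldl]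
  rw [h1, pv_foldl_add_filter c t [c] (by simp),
    pv_foldl_add_cons c _ [] (by intro x hx; simp at hx; exact fun h => absurd h (by simpa [bne, h] using hx.2))]
  simp [PySem.List.dedup_eq_ofList, PySem.Set.ofList_eq_foldl]

lemma pv_loopA_eq : ∀ (n : Nat) (l : List Char), l.length ≤ n →
    loopA l = (PySem.List.dedup l).map (fun x => (l.count x : Int)) := by
  intro n
  induction n with
  | zero => intro l h
            have : l = [] := List.eq_nil_of_length_eq_zero (Nat.le_zero.mp h)
            subst this; simp [loopA, PySem.List.dedup]
  | succ n ih =>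
    intro l h
    cases l with
    | nil => simp [loopA, PySem.List.dedup]
    | cons c t =>
      rw [loopA, pv_replace_single, pv_dedup_cons]
      have hfl : (List.filter (fun x => x != c) (c :: t)) = t.filter (fun x => x != c) := by
        simp [List.filter]
      rw [hfl]
      have hlen : (t.filter (fun x => x != c)).length ≤ n := by
        have := List.length_filter_le (fun x => x != c) t
        simpa using Nat.le_trans this (Nat.succ_le_succ_iff.mp h)
      rw [ih _ hlen]
      congr 1
      · have hsplit : t.length = (t.filter (fun x => x != c)).length + t.count c := by
          have := List.length_eq_countP_add_countP (p := fun x => x != c) (l := t)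
          have hlenf : (List.filter (fun x => x != c) t).length = t.countP (fun x => x != c) := by
            rw [List.countP_eq_length_filter]
          have hc : List.countP (fun a => decide ¬(a != c) = true) t = t.count c := by
            rw [List.count]
            apply List.countP_congr
            intro x _
            by_cases hxc : x = c <;> simp [hxc]
          omega
        have : (c :: t).count c = t.count c + 1 := by simp
        simp [this, hsplit]
        ring
      · apply List.map_congr_left
        intro x hx
        have hxc : x ≠ c := by
          have : x ∈ t.filter (fun x => x != c) := (PySem.List.mem_dedup _ x).mp hx
          simpa [bne] using (List.mem_filter.mp this).2
        have : (t.filter (fun y => y != c)).count x = (c :: t).count x := by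
          rw [List.count_cons]
          simp [hxc, Ne.symm hxc, List.count_filter]
        rw [this]

lemma pv_loop_eq_values (l : List Char) :
    loopA l = (pv_countsOf l).values := by
  rw [pv_countsOf, PySem.Dict.foldl_insert_getD_add_one_eq_counter]
  have hv : PySem.Dict.values (PySem.Dict.counter l)
      = (PySem.Dict.items (PySem.Dict.counter l)).map (·.2) := rfl
  rw [hv, PySem.Dict.items_counter]
  rw [pv_loopA_eq l.length l le_rfl]
  simp [PySem.List.dedup_eq_ofList]

lemma pv_getD_ranks (r : List Int) :
    PySem.Dict.getD pv_type_ranks r 7 =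
      (if r = [5] then 1
       else if r = [4, 1] then 2
       else if r = [3, 2] then 3
       else if r = [3, 1, 1] then 4
       else if r = [2, 2, 1] then 5
       else if r = [2, 1, 1, 1] then 6
       else 7) := by
  have h : pv_type_ranks = PySem.Dict.mk
      [([5], 1), ([4, 1], 2), ([3, 2], 3), ([3, 1, 1], 4), ([2, 2, 1], 5), ([2, 1, 1, 1], 6)] := by
    rfl
  rw [h]
  simp only [PySem.Dict.getD, PySem.Dict.get?_mk_cons, beq_iff_eq]
  by_cases h1 : r = [5]
  · simp [h1]
  · by_cases h2 : r = [4, 1]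
    · simp [h2]
    · by_cases h3 : r = [3, 2]
      · simp [h3]
      · by_cases h4 : r = [3, 1, 1]
        · simp [h4]
        · by_cases h5 : r = [2, 2, 1]
          · simp [h5]
          · by_cases h6 : r = [2, 1, 1, 1]
            · simp [h6]
            · rw [if_neg (mt Eq.symm h1), if_neg (mt Eq.symm h2), if_neg (mt Eq.symm h3),
                if_neg (mt Eq.symm h4), if_neg (mt Eq.symm h5), if_neg (mt Eq.symm h6),
                if_neg h1, if_neg h2, if_neg h3, if_neg h4, if_neg h5, if_neg h6]
              rfl

lemma pv_cs_eq : card_strength_b = card_strength := rfl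

lemma pv_values_nil (l : List Char)
    (h : (pv_countsOf l).values = []) :
    l = [] := by
  cases l with
  | nil => rfl
  | cons c t =>
    exfalso
    have := pv_loop_eq_values (c :: t)
    rw [h] at this
    rw [loopA] at this
    exact absurd this (by simp)

-- ===== VERDICT (by name: the statement is the Claim_ definition above) =====
set_option maxHeartbeats 1000000 in
theorem hand_strength_spec : Claim_equal_hand_strength := by
  intro hand part _ _
  unfold Spec_hand_strength hand_strength hand_strength_alt
  simp only [pv_loop_eq_values, pv_cs_eq, pv_getD_ranks]
  cases hr : PySem.List.sorted
      (pv_countsOf (if part = 2 then PySem.Chars.replace hand.toList ['J'] [] else hand.toList)).values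
      (fun x => x) true with
  | cons r rest => rfl
  | nil =>
    by_cases hp : part = 2
    · rw [if_pos hp] at hr
      have hc : PySem.Chars.replace hand.toList ['J'] [] = [] :=
        pv_values_nil _ ((PySem.List.sorted_eq_nil_iff _ _ _).mp hr)
      simp [hp, hc]
    · simp [hp]
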